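-- pv_equiv track=rewrite | github.com/kimsinhyun/CodingTest | 종우/JadenCase.py | solution
-- ===== SOURCE A (Python) =====
-- def solution(s):
--     a = s.lower()
--     if a[0].isalpha():
--         a = a[0].upper() + a[1:]
--     for i in range(1, len(a)):
--         if a[i].isalpha() and a[i-1] == " ":
--             a = a[:i] + a[i].upper() + a[i+1:]
--     return a
-- ===== SOURCE B (Python) =====
-- def solution(s):
--     # One pass with a word-start flag: no indexing, no slice surgery.
--     out = []
--     word_start = True
--     for ch in s:
--         c = ch.lower()
--         out.append(c.upper() if word_start else c)
--         word_start = c == " "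
--     return "".join(out)
-- ===== Notes on version B (the rewrite author's own statement) =====
-- stated objective: alternative
-- what changed: A's two-phase index loop that rebuilds the whole string by slicing (a[:i] + c + a[i+1:]) at every capitalized character is replaced by a single left-to-right pass carrying a word-start flag and collecting output characters in a list joined once at the end; it trades A's index arithmetic and slice surgery for a state-machine accumulator.
import Mathlib
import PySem

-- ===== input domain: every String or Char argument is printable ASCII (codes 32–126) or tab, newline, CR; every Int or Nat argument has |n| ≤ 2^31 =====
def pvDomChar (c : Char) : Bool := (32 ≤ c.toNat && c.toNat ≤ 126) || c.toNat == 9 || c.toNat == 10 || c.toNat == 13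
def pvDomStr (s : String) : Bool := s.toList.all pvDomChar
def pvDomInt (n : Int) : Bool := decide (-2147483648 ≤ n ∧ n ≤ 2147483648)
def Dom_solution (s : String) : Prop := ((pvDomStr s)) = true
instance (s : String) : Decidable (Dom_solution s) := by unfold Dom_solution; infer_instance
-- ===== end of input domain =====

-- B replaces A's index loop with per-step slice surgery by a single pass carrying a word-start flag and an output accumulator.


-- ===== PORT A =====
-- a[0] fix-up: if a[0].isalpha(): a = a[0].upper() + a[1:]   (a[0]: none = IndexError, excluded by Pre_)
def solutionFix (a : List Char) : List Char :=
  match PySem.List.pyGet? a 0 with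
  | some c =>
      if PySem.Chars.isalpha c then
        PySem.Chars.upperChar c :: PySem.List.slice a (some 1) none
      else a
  | none => a

-- loop body: if a[i].isalpha() and a[i-1] == " ": a = a[:i] + a[i].upper() + a[i+1:]
def solutionStep (b : List Char) (i : Int) : List Char :=
  match PySem.List.pyGet? b i, PySem.List.pyGet? b (i - 1) with
  | some ci, some cp =>
      if PySem.Chars.isalpha ci && (cp == ' ') then
        PySem.List.slice b none (some i) ++ [PySem.Chars.upperChar ci]
          ++ PySem.List.slice b (some (i + 1)) none
      else b
  | _, _ => b

def solution (s : String) : String :=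
  let a0 := (PySem.Str.lower s).toList
  let a1 := solutionFix a0
  String.ofList ((PySem.List.pyRange 1 (a1.length : Int)).foldl solutionStep a1)

-- ===== PORT B =====
-- loop body: c = ch.lower(); out.append(c.upper() if word_start else c); word_start = c == " "
def solutionAltStep (st : List (List Char) × Bool) (ch : Char) : List (List Char) × Bool :=
  let c := PySem.Chars.lowerChar ch
  (st.1 ++ [if st.2 then [PySem.Chars.upperChar c] else [c]], c == ' ')

def solution_alt (s : String) : String :=
  let r := s.toList.foldl solutionAltStep ([], true)
  String.ofList (PySem.Chars.join [] r.1)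

-- ===== PRECONDITION & SPEC =====
-- Pre_ excludes only the empty string, on which A raises IndexError at a[0].
def Pre_solution (s : String) : Prop := s ≠ ""
instance (s : String) : Decidable (Pre_solution s) := by unfold Pre_solution; infer_instance
def pvWitness_solution : String := "hello worlD  3x"

def Spec_solution (s : String) (out : String) : Prop := out = solution_alt s
instance (s : String) (out : String) : Decidable (Spec_solution s out) := by unfold Spec_solution; infer_instance

-- ===== CLAIM (what is proved, stated in full; the proofs are below) =====
def Claim_equal_solution : Prop := ∀ (s : String), Dom_solution s → Pre_solution s → Spec_solution s (solution s)

-- ===== LEMMAS AND PROOFS =====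

-- The Jaden-case transform both programs compute, as a one-pass recursion with a word-start flag.
def pvCap : Bool → List Char → List Char
  | _, [] => []
  | b, c :: r => (if b then PySem.Chars.upperChar c else c) :: pvCap (c == ' ') r

theorem pvCap_length (b : Bool) (l : List Char) : (pvCap b l).length = l.length := by
  induction l generalizing b with
  | nil => rfl
  | cons c r ih => simp [pvCap, ih]

theorem pvUpperChar_ne_space (c : Char) (h : c ≠ ' ') : PySem.Chars.upperChar c ≠ ' ' := by
  unfold PySem.Chars.upperChar
  split
  · rename_i hl
    simp only [PySem.Chars.islower, Bool.and_eq_true, decide_eq_true_eq] at hl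
    obtain ⟨h1, h2⟩ := hl
    have ha : 97 ≤ c.toNat := h1
    have hb : c.toNat ≤ 122 := h2
    intro he
    have ht : (Char.ofNat (c.toNat - 32)).toNat = 32 := by rw [he]; decide
    rw [Char.toNat_ofNat, if_pos (Or.inl (by omega))] at ht
    omega
  · exact h

theorem pvUpperChar_of_not_alpha (c : Char) (h : PySem.Chars.isalpha c = false) :
    PySem.Chars.upperChar c = c := by
  simp only [PySem.Chars.isalpha, Bool.or_eq_false_iff] at h
  simp [PySem.Chars.upperChar, h.2]

-- element description of pvCap: the flag at i > 0 is "previous original char is a space"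
theorem pvCap_get (b : Bool) (l : List Char) (i : Nat) (h : i < l.length) :
    (pvCap b l)[i]? =
      some (if (if i = 0 then b else (l.getD (i - 1) ' ' == ' '))
            then PySem.Chars.upperChar (l.getD i ' ') else l.getD i ' ') := by
  induction l generalizing b i with
  | nil => simp at h
  | cons c r ih =>
    cases i with
    | zero => simp [pvCap]
    | succ j =>
      have hj : j < r.length := by simpa using h
      cases j with
      | zero => simpa [pvCap] using ih (c == ' ') 0 hj
      | succ k => simpa [pvCap] using ih (c == ' ') (k + 1) hj

theorem pvCap_getD (b : Bool) (l : List Char) (i : Nat) (h : i < l.length) :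
    (pvCap b l).getD i ' ' =
      (if (if i = 0 then b else (l.getD (i - 1) ' ' == ' '))
       then PySem.Chars.upperChar (l.getD i ' ') else l.getD i ' ') := by
  rw [List.getD_eq_getElem?_getD, pvCap_get b l i h]; rfl

theorem pvCap_space (b : Bool) (l : List Char) (i : Nat) (h : i < l.length) :
    ((pvCap b l).getD i ' ' = ' ') ↔ (l.getD i ' ' = ' ') := by
  rw [pvCap_getD b l i h]
  by_cases hc : (if i = 0 then b else (l.getD (i - 1) ' ' == ' ')) = true
  · rw [if_pos hc]
    constructor
    · intro hu
      by_contra hne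
      exact pvUpperChar_ne_space _ hne hu
    · intro hsp
      rw [hsp]
      decide
  · rw [if_neg hc]

-- one loop step of A sends (F.take i ++ o.drop i) to (F.take (i+1) ++ o.drop (i+1))
theorem pvStepA (o : List Char) (i : Nat) (h1 : 1 ≤ i) (h2 : i < o.length) :
    solutionStep ((pvCap true o).take i ++ o.drop i) (i : Int)
    = (pvCap true o).take (i + 1) ++ o.drop (i + 1) := by
  set F := pvCap true o with hF
  have hFlen : F.length = o.length := pvCap_length true o
  have hti : (F.take i).length = i := by
    rw [List.length_take]; omega
  -- a[i]
  have hai : PySem.List.pyGet? (F.take i ++ o.drop i) (i : Int) = some (o.getD i ' ') := by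
    rw [PySem.List.pyGet?_natCast, List.getElem?_append_right (le_of_eq hti), hti,
      Nat.sub_self, List.getElem?_drop, Nat.add_zero, List.getElem?_eq_getElem h2]
    simp [List.getD_eq_getElem?_getD, List.getElem?_eq_getElem h2]
  -- a[i-1]
  have hcast : ((i : Int) - 1) = ((i - 1 : Nat) : Int) := by omega
  have hip : i - 1 < i := by omega
  have hFm : i - 1 < F.length := by omega
  have haim : PySem.List.pyGet? (F.take i ++ o.drop i) ((i : Int) - 1) = some (F.getD (i - 1) ' ') := by
    rw [hcast, PySem.List.pyGet?_natCast, List.getElem?_append_left (by omega),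
      List.getElem?_take_of_lt hip, List.getElem?_eq_getElem hFm]
    simp [List.getD_eq_getElem?_getD, List.getElem?_eq_getElem hFm]
  -- slices
  have hsl1 : PySem.List.slice (F.take i ++ o.drop i) none (some (i : Int)) = F.take i := by
    rw [PySem.List.slice_to _ (by positivity), Int.toNat_natCast, List.take_left' hti]
  have hsl2 : PySem.List.slice (F.take i ++ o.drop i) (some ((i : Int) + 1)) none = o.drop (i + 1) := by
    have hc : ((i : Int) + 1) = ((i + 1 : Nat) : Int) := by omega
    rw [hc, PySem.List.slice_from _ (by positivity), Int.toNat_natCast]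
    have hsplit : List.drop (i + 1) (F.take i ++ o.drop i)
        = List.drop 1 (List.drop i (F.take i ++ o.drop i)) := by
      rw [List.drop_drop]
    rw [hsplit, List.drop_left' hti, List.drop_drop]
  -- F at i
  have hFi : F.getD i ' ' = (if (o.getD (i - 1) ' ' == ' ')
      then PySem.Chars.upperChar (o.getD i ' ') else o.getD i ' ') := by
    rw [hF, pvCap_getD true o i h2]
    have hne0 : ¬ (i = 0) := by omega
    simp [hne0]
  -- take (i+1)
  have htake : F.take (i + 1) = F.take i ++ [F.getD i ' '] := by
    have hFm2 : i < F.length := by omega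
    rw [List.take_add_one]
    simp [List.getElem?_eq_getElem hFm2, List.getD_eq_getElem?_getD]
  unfold solutionStep
  rw [hai, haim]
  dsimp only
  by_cases hcond : (PySem.Chars.isalpha (o.getD i ' ') && (F.getD (i - 1) ' ' == ' ')) = true
  · rw [if_pos hcond, hsl1, hsl2, htake]
    simp only [Bool.and_eq_true, beq_iff_eq] at hcond
    have hsp : o.getD (i - 1) ' ' = ' ' := (pvCap_space true o (i - 1) (by omega)).mp hcond.2
    have hFi2 : F.getD i ' ' = PySem.Chars.upperChar (o.getD i ' ') := by
      rw [hFi, if_pos (by rw [hsp]; rfl)]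
    rw [hFi2, List.append_assoc]
  · rw [if_neg hcond]
    simp only [Bool.and_eq_true, beq_iff_eq, not_and] at hcond
    have hFi3 : F.getD i ' ' = o.getD i ' ' := by
      rw [hFi]
      split
      · rename_i hsp
        by_cases ha : PySem.Chars.isalpha (o.getD i ' ') = true
        · exfalso
          exact hcond ha ((pvCap_space true o (i - 1) (by omega)).mpr ((beq_iff_eq ..).mp hsp))
        · exact pvUpperChar_of_not_alpha _ (by simpa using ha)
      · rfl
    have hdrop : o.drop i = o.getD i ' ' :: o.drop (i + 1) := by
      rw [List.drop_eq_getElem_cons h2]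
      simp [List.getD_eq_getElem?_getD, List.getElem?_eq_getElem h2]
    rw [htake, hFi3, hdrop, List.append_assoc]
    rfl

-- the whole loop, from position k
theorem pvLoopA (o : List Char) (d k : Nat) (h1 : 1 ≤ k) (h2 : k ≤ o.length)
    (hd : o.length - k = d) :
    (PySem.List.pyRange (k : Int) (o.length : Int)).foldl solutionStep
      ((pvCap true o).take k ++ o.drop k)
    = pvCap true o := by
  induction d generalizing k with
  | zero =>
    have hk : k = o.length := by omega
    rw [PySem.List.pyRange_one_eq_nil (by omega)]
    simp [hk, List.take_of_length_le (le_of_eq (pvCap_length true o))]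
  | succ n ih =>
    have hk : k < o.length := by omega
    rw [PySem.List.pyRange_one_cons (by exact_mod_cast hk), List.foldl_cons,
      pvStepA o k h1 hk]
    have hc : ((k : Int) + 1) = ((k + 1 : Nat) : Int) := by omega
    rw [hc]
    exact ih (k + 1) (by omega) (by omega) (by omega)

-- A computes pvCap true on the lowered character list
theorem pvA_core (o : List Char) (hne : o ≠ []) :
    (PySem.List.pyRange 1 ((solutionFix o).length : Int)).foldl solutionStep (solutionFix o)
    = pvCap true o := by
  obtain ⟨c, r, hcr⟩ := List.exists_cons_of_ne_nil hne
  have hol : 1 ≤ o.length := by rw [hcr]; simp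
  have hfix : solutionFix o = (pvCap true o).take 1 ++ o.drop 1 := by
    unfold solutionFix
    rw [hcr]
    have hg : PySem.List.pyGet? (c :: r) (0 : Int) = some c := by
      rw [show (0 : Int) = ((0 : Nat) : Int) by simp, PySem.List.pyGet?_natCast]
      simp
    rw [hg]
    have hsl : PySem.List.slice (c :: r) (some 1) none = r := by
      rw [show (1 : Int) = ((1 : Nat) : Int) by simp, PySem.List.slice_from _ (by positivity)]
      simp
    by_cases ha : PySem.Chars.isalpha c = true
    · simp [ha, hsl, pvCap]
    · have hu : PySem.Chars.upperChar c = c := pvUpperChar_of_not_alpha c (by simpa using ha)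
      simp [ha, pvCap, hu]
  have hlen : (solutionFix o).length = o.length := by
    rw [hfix, List.length_append, List.length_take, pvCap_length, List.length_drop]
    omega
  rw [hlen, hfix]
  exact_mod_cast pvLoopA o (o.length - 1) 1 (le_refl 1) hol rfl

theorem pvA_eq (s : String) (hs : s ≠ "") :
    solution s = String.ofList (pvCap true (List.map PySem.Chars.lowerChar s.toList)) := by
  have hoo : (PySem.Str.lower s).toList = List.map PySem.Chars.lowerChar s.toList := by
    rw [PySem.Str.toList_lower, PySem.Chars.lower]
  have hne : List.map PySem.Chars.lowerChar s.toList ≠ [] := by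
    simp only [ne_eq, List.map_eq_nil_iff]
    intro hnil
    exact hs (by simpa using congrArg String.ofList hnil)
  show String.ofList ((PySem.List.pyRange 1
      (((solutionFix (PySem.Str.lower s).toList)).length : Int)).foldl solutionStep
      (solutionFix (PySem.Str.lower s).toList)) = _
  rw [hoo]
  exact congrArg String.ofList (pvA_core _ hne)

-- B's fold collects the pvCap characters as singleton strings
theorem pvB_fold (l : List Char) (acc : List (List Char)) (b : Bool) :
    (l.foldl solutionAltStep (acc, b)).1
    = acc ++ (pvCap b (List.map PySem.Chars.lowerChar l)).map (fun c => [c]) := by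
  induction l generalizing acc b with
  | nil => simp [pvCap]
  | cons c r ih =>
    simp only [List.foldl_cons, List.map_cons, pvCap]
    rw [solutionAltStep, ih]
    have hsing : (if b then [PySem.Chars.upperChar (PySem.Chars.lowerChar c)]
            else [PySem.Chars.lowerChar c])
          = [if b then PySem.Chars.upperChar (PySem.Chars.lowerChar c)
             else PySem.Chars.lowerChar c] := by
      split <;> rfl
    simp [hsing]

theorem pvB_eq (s : String) :
    solution_alt s = String.ofList (pvCap true (List.map PySem.Chars.lowerChar s.toList)) := by
  show String.ofList (PySem.Chars.join [] (s.toList.foldl solutionAltStep ([], true)).1) = _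
  rw [pvB_fold s.toList [] true]
  simp [PySem.Chars.join_nil_singletons]

-- ===== VERDICT (by name: the statement is the Claim_ definition above) =====
theorem solution_spec : Claim_equal_solution := by
  intro s _ hpre
  unfold Spec_solution
  rw [pvA_eq s hpre, pvB_eq s]
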